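-- pv_equiv track=rewrite | github.com/nahcikeel/Algorithm | 프로그래머스/2/77485. 행렬 테두리 회전하기/행렬 테두리 회전하기.py | solution
-- ===== SOURCE A (Python) =====
-- def solution(rows, columns, queries):
--
--     graph = [[0]*columns for _ in range(rows)]
--     num = 1
--     for i in range(rows):
--         for j in range(columns):
--             graph[i][j] = num
--             num += 1
--
--     answer = []
--     for x1,y1,x2,y2 in queries:
--         x1 -= 1
--         y1 -= 1
--         x2 -= 1
--         y2 -= 1
--
--         temp = graph[x1][y1]
--         min_val = temp
--
--         # 왼선
--         for i in range(x1,x2):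
--             graph[i][y1] = graph[i+1][y1]
--             min_val = min(min_val, graph[i][y1])
--
--         # 아래선
--         for i in range(y1,y2):
--             graph[x2][i] = graph[x2][i+1]
--             min_val = min(min_val, graph[x2][i])
--
--         # 오른선
--         for i in range(x2,x1,-1):
--             graph[i][y2] = graph[i-1][y2]
--             min_val = min(min_val, graph[i][y2])
--
--         # 윗선
--         for i in range(y2,y1,-1):
--             graph[x1][i] = graph[x1][i-1]
--             min_val = min(min_val, graph[x1][i])
--
--         graph[x1][y1+1] = temp
--         answer.append(min_val)
--
--     return answer
-- ===== SOURCE B (Python) =====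
-- def solution(rows, columns, queries):
--     graph = [[r * columns + c + 1 for c in range(columns)] for r in range(rows)]
--     answer = []
--     for x1, y1, x2, y2 in queries:
--         x1 -= 1; y1 -= 1; x2 -= 1; y2 -= 1
--         coords = (
--             [(x1, j) for j in range(y1, y2)]
--             + [(i, y2) for i in range(x1, x2)]
--             + [(x2, j) for j in range(y2, y1, -1)]
--             + [(i, y1) for i in range(x2, x1, -1)]
--         )
--         vals = [graph[i][j] for (i, j) in coords]
--         answer.append(min(vals))
--         rotated = [vals[-1]] + vals[:-1]
--         for (i, j), v in zip(coords, rotated):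
--             graph[i][j] = v
--     return answer
-- ===== Notes on version B (the rewrite author's own statement) =====
-- stated objective: alternative
-- what changed: Per query, A shifts border values with four interleaved in-place neighbour-copy loops carrying a running min; B walks the border once clockwise collecting coordinates, gathers their values, answers min(vals), and scatters the one-step-rotated value list back.
-- outside the precondition, e.g. on solution(4, 4, [(4, 3, 2, 3)]): A returns [15], B raises ValueError; on solution(1, 4, [(1, 1, 1, 4), (1, 1, 1, 4)]): A returns [1, 1], B returns [1, 2]
import Mathlib
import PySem

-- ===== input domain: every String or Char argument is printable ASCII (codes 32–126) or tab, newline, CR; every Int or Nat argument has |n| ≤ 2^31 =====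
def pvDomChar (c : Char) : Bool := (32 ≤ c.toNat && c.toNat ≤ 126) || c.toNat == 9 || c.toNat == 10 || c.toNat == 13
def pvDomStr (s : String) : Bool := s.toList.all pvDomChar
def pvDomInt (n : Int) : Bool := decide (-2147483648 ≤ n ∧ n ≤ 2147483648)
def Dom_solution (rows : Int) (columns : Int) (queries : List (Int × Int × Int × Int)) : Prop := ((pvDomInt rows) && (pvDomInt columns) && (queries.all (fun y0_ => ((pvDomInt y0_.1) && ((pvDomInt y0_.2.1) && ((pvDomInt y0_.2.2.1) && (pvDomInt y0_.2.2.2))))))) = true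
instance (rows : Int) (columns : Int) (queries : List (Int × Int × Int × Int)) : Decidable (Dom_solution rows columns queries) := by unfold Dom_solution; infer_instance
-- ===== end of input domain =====

-- B replaces A's four interleaved neighbour-shift border loops by a clockwise gather / min / scatter
-- of the rotated value list (objective: alternative decomposition, same cost).

-- grid cell read g[i][j] / write g[i][j] = v; exact for 0 ≤ i,j in range (guaranteed under Pre_)
def pvGet (g : List (List Int)) (i j : Int) : Int :=
  PySem.List.pyGetD (PySem.List.pyGetD g i []) j 0

def pvSet (g : List (List Int)) (i j : Int) (v : Int) : List (List Int) :=
  PySem.List.pySetD g i (PySem.List.pySetD (PySem.List.pyGetD g i []) j v)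

-- ===== PORT A =====
-- graph = [[0]*columns …]; nested loops numbering cells 1..rows*columns
def buildA (rows columns : Int) : List (List Int) :=
  ((PySem.List.pyRange 0 rows 1).foldl (fun s i =>
      (PySem.List.pyRange 0 columns 1).foldl (fun s j => (pvSet s.1 i j s.2, s.2 + 1)) s)
    (List.replicate rows.toNat (List.replicate columns.toNat 0), 1)).1

-- one query of A: the four in-place shift loops with the running min, then the corner write
def stepA (s : List (List Int) × List Int) (q : Int × Int × Int × Int) :
    List (List Int) × List Int :=
  let x1 := q.1 - 1
  let y1 := q.2.1 - 1
  let x2 := q.2.2.1 - 1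
  let y2 := q.2.2.2 - 1
  let temp := pvGet s.1 x1 y1
  let t1 := (PySem.List.pyRange x1 x2 1).foldl
      (fun t i => (pvSet t.1 i y1 (pvGet t.1 (i + 1) y1),
                   min t.2 (pvGet (pvSet t.1 i y1 (pvGet t.1 (i + 1) y1)) i y1)))
      (s.1, temp)
  let t2 := (PySem.List.pyRange y1 y2 1).foldl
      (fun t i => (pvSet t.1 x2 i (pvGet t.1 x2 (i + 1)),
                   min t.2 (pvGet (pvSet t.1 x2 i (pvGet t.1 x2 (i + 1))) x2 i)))
      t1
  let t3 := (PySem.List.pyRange x2 x1 (-1)).foldl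
      (fun t i => (pvSet t.1 i y2 (pvGet t.1 (i - 1) y2),
                   min t.2 (pvGet (pvSet t.1 i y2 (pvGet t.1 (i - 1) y2)) i y2)))
      t2
  let t4 := (PySem.List.pyRange y2 y1 (-1)).foldl
      (fun t i => (pvSet t.1 x1 i (pvGet t.1 x1 (i - 1)),
                   min t.2 (pvGet (pvSet t.1 x1 i (pvGet t.1 x1 (i - 1))) x1 i)))
      t3
  (pvSet t4.1 x1 (y1 + 1) temp, s.2 ++ [t4.2])

def solution (rows : Int) (columns : Int) (queries : List (Int × Int × Int × Int)) : List Int :=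
  (queries.foldl stepA (buildA rows columns, [])).2

-- ===== PORT B =====
-- graph = [[r*columns + c + 1 for c in range(columns)] for r in range(rows)]
def buildB (rows columns : Int) : List (List Int) :=
  (PySem.List.pyRange 0 rows 1).map (fun r =>
    (PySem.List.pyRange 0 columns 1).map (fun c => r * columns + c + 1))

-- one query of B: clockwise border coordinates, gather values, min, scatter rotated values
def stepB (s : List (List Int) × List Int) (q : Int × Int × Int × Int) :
    List (List Int) × List Int :=
  let x1 := q.1 - 1
  let y1 := q.2.1 - 1
  let x2 := q.2.2.1 - 1
  let y2 := q.2.2.2 - 1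
  let coords :=
    (PySem.List.pyRange y1 y2 1).map (fun j => (x1, j)) ++
    (PySem.List.pyRange x1 x2 1).map (fun i => (i, y2)) ++
    (PySem.List.pyRange y2 y1 (-1)).map (fun j => (x2, j)) ++
    (PySem.List.pyRange x2 x1 (-1)).map (fun i => (i, y1))
  let vals := coords.map (fun c => pvGet s.1 c.1 c.2)
  -- min(vals); exact since vals ≠ [] under Pre_ (Python raises ValueError on an empty border walk)
  let m := (PySem.List.min? vals (fun v => v)).getD 0
  -- [vals[-1]] + vals[:-1]
  let rotated := PySem.List.pyGetD vals (-1) 0 :: PySem.List.slice vals none (some (-1))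
  let g' := (coords.zip rotated).foldl (fun h e => pvSet h e.1.1 e.1.2 e.2) s.1
  (g', s.2 ++ [m])

def solution_alt (rows : Int) (columns : Int) (queries : List (Int × Int × Int × Int)) : List Int :=
  (queries.foldl stepB (buildB rows columns, [])).2

-- ===== PRECONDITION & SPEC =====
-- Pre_ restricts each query to a proper in-bounds rectangle (as the original problem guarantees):
-- outside it A raises IndexError, or on degenerate one-row/one-column/one-cell "rectangles" A returns
-- a grid produced by accidental partial shifts (and B's border walk is equally accidental or raises).
def Pre_solution (rows : Int) (columns : Int) (queries : List (Int × Int × Int × Int)) : Prop :=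
  ∀ q ∈ queries, 1 ≤ q.1 ∧ q.1 < q.2.2.1 ∧ q.2.2.1 ≤ rows ∧
                 1 ≤ q.2.1 ∧ q.2.1 < q.2.2.2 ∧ q.2.2.2 ≤ columns
instance (rows : Int) (columns : Int) (queries : List (Int × Int × Int × Int)) : Decidable (Pre_solution rows columns queries) := by unfold Pre_solution; infer_instance

def pvWitness_solution : Int × Int × (List (Int × Int × Int × Int)) :=
  (3, 3, [(1, 1, 3, 3), (1, 2, 2, 3)])

def Spec_solution (rows : Int) (columns : Int) (queries : List (Int × Int × Int × Int)) (out : List Int) : Prop := out = solution_alt rows columns queries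
instance (rows : Int) (columns : Int) (queries : List (Int × Int × Int × Int)) (out : List Int) : Decidable (Spec_solution rows columns queries out) := by unfold Spec_solution; infer_instance

-- ===== CLAIM (what is proved, stated in full; the proofs are below) =====
def Claim_equal_solution : Prop := ∀ (rows : Int) (columns : Int) (queries : List (Int × Int × Int × Int)), Dom_solution rows columns queries → Pre_solution rows columns queries → Spec_solution rows columns queries (solution rows columns queries)

-- ===== LEMMAS AND PROOFS =====

-- shape of a rows × columns grid
def Shape (g : List (List Int)) (R C : Int) : Prop :=
  (g.length : Int) = R ∧ ∀ row ∈ g, (row.length : Int) = C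

theorem shape_pvSet {g : List (List Int)} {R C : Int} (h : Shape g R C)
    {i : Int} (hi : 0 ≤ i) (j v : Int) : Shape (pvSet g i j v) R C := by
  obtain ⟨hlen, hrow⟩ := h
  unfold pvSet
  rw [PySem.List.pySetD_of_nonneg _ _ hi]
  by_cases hin : i < (g.length : Int)
  · constructor
    · simp [hlen]
    · intro row hr
      rcases List.mem_or_eq_of_mem_set hr with h' | h'
      · exact hrow row h'
      · subst h'
        rw [PySem.List.length_pySetD,
            PySem.List.pyGetD_eq_getElem _ _ hi (by simpa using hin)]
        exact hrow _ (List.getElem_mem (by omega))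
  · rw [List.set_eq_of_length_le (by omega)]
    exact ⟨hlen, hrow⟩

theorem pvGet_pvSet_self {g : List (List Int)} {R C : Int} (h : Shape g R C)
    {i j : Int} (hi : 0 ≤ i) (hiR : i < R) (hj : 0 ≤ j) (hjC : j < C) (v : Int) :
    pvGet (pvSet g i j v) i j = v := by
  obtain ⟨hlen, hrow⟩ := h
  have hiN : i.toNat < g.length := by omega
  unfold pvSet pvGet
  rw [PySem.List.pySetD_of_nonneg _ _ hi,
      PySem.List.pyGetD_eq_getElem _ _ hi (by simp only [List.length_set]; omega),
      List.getElem_set_self,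
      PySem.List.pySetD_of_nonneg _ _ hj,
      PySem.List.pyGetD_eq_getElem _ _ hi (by omega),
      PySem.List.pyGetD_eq_getElem _ _ hj]
  · rw [List.getElem_set_self]
  · have := hrow _ (List.getElem_mem hiN)
    simp only [List.length_set]
    omega

theorem pvGet_pvSet_ne {g : List (List Int)} {i j p q : Int}
    (hi : 0 ≤ i) (hj : 0 ≤ j) (hp : 0 ≤ p) (hq : 0 ≤ q)
    (hne : p ≠ i ∨ q ≠ j) (v : Int) :
    pvGet (pvSet g i j v) p q = pvGet g p q := by
  have ei : i = ((i.toNat : Nat) : Int) := by omega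
  have ep : p = ((p.toNat : Nat) : Int) := by omega
  have ej : j = ((j.toNat : Nat) : Int) := by omega
  have eq' : q = ((q.toNat : Nat) : Int) := by omega
  unfold pvSet pvGet
  rw [PySem.List.pySetD_of_nonneg _ _ hi]
  rcases hne with hne | hne
  · have : p.toNat ≠ i.toNat := by omega
    rw [ep, PySem.List.pyGetD_natCast _ _ _, PySem.List.pyGetD_natCast _ _ _,
        List.getD_eq_getElem?_getD, List.getD_eq_getElem?_getD,
        List.getElem?_set_ne (by omega)]
  · by_cases hpi : p = i
    · subst hpi
      by_cases hin : p.toNat < g.length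
      · rw [ep, PySem.List.pyGetD_natCast _ _ _, PySem.List.pyGetD_natCast _ _ _,
            List.getD_eq_getElem?_getD, List.getD_eq_getElem?_getD]
        simp only [Int.toNat_natCast]
        rw [List.getElem?_set_self (by omega)]
        simp only [Option.getD, List.getElem?_eq_getElem hin]
        rw [PySem.List.pySetD_of_nonneg _ _ hj]
        rw [eq', PySem.List.pyGetD_natCast _ _ _, PySem.List.pyGetD_natCast _ _ _,
            List.getD_eq_getElem?_getD, List.getD_eq_getElem?_getD,
            List.getElem?_set_ne (by omega)]
      · rw [List.set_eq_of_length_le (by omega)]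
    · have : p.toNat ≠ i.toNat := by omega
      rw [ep, PySem.List.pyGetD_natCast _ _ _, PySem.List.pyGetD_natCast _ _ _,
          List.getD_eq_getElem?_getD, List.getD_eq_getElem?_getD,
          List.getElem?_set_ne (by omega)]

theorem pair_ne {a b : Int × Int} (h : a ≠ b) : a.1 ≠ b.1 ∨ a.2 ≠ b.2 := by
  by_contra hc
  push Not at hc
  exact h (Prod.ext hc.1 hc.2)

-- canonical shape of A's shift-loop body: write cell w i with the value read at cell r i,
-- fold the written-back value into the running min
def wfStep (w r : Int → Int × Int) (t : List (List Int) × Int) (i : Int) :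
    List (List Int) × Int :=
  (pvSet t.1 (w i).1 (w i).2 (pvGet t.1 (r i).1 (r i).2),
   min t.2 (pvGet (pvSet t.1 (w i).1 (w i).2 (pvGet t.1 (r i).1 (r i).2)) (w i).1 (w i).2))

theorem writeFold_char (w r : Int → Int × Int) (R C : Int) (l : List Int) :
    ∀ (g : List (List Int)) (m : Int),
    Shape g R C →
    (∀ i ∈ l, 0 ≤ (w i).1 ∧ (w i).1 < R ∧ 0 ≤ (w i).2 ∧ (w i).2 < C) →
    (∀ i ∈ l, 0 ≤ (r i).1 ∧ 0 ≤ (r i).2) →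
    l.Pairwise (fun j i => w j ≠ r i) →
    l.Pairwise (fun j i => w j ≠ w i) →
    Shape (l.foldl (wfStep w r) (g, m)).1 R C ∧
    (∀ i ∈ l, pvGet (l.foldl (wfStep w r) (g, m)).1 (w i).1 (w i).2
        = pvGet g (r i).1 (r i).2) ∧
    (∀ p q : Int, 0 ≤ p → 0 ≤ q → (∀ i ∈ l, w i ≠ (p, q)) →
        pvGet (l.foldl (wfStep w r) (g, m)).1 p q = pvGet g p q) ∧
    (l.foldl (wfStep w r) (g, m)).2
        = (l.map (fun i => pvGet g (r i).1 (r i).2)).foldl min m := by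
  induction l using List.reverseRecOn with
  | nil =>
      intro g m hS _ _ _ _
      exact ⟨hS, by simp, by simp, by simp⟩
  | append_singleton l' x ih =>
      intro g m hS hw hr hfresh hdist
      have hwl' : ∀ i ∈ l', 0 ≤ (w i).1 ∧ (w i).1 < R ∧ 0 ≤ (w i).2 ∧ (w i).2 < C :=
        fun i hi => hw i (List.mem_append_left _ hi)
      have hrl' : ∀ i ∈ l', 0 ≤ (r i).1 ∧ 0 ≤ (r i).2 :=
        fun i hi => hr i (List.mem_append_left _ hi)
      have hwx := hw x (List.mem_append_right _ (List.mem_singleton_self x))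
      have hrx := hr x (List.mem_append_right _ (List.mem_singleton_self x))
      rw [List.pairwise_append] at hfresh hdist
      obtain ⟨hfresh', _, hfx⟩ := hfresh
      obtain ⟨hdist', _, hdx⟩ := hdist
      obtain ⟨ihS, ihV, ihU, ihM⟩ := ih g m hS hwl' hrl' hfresh' hdist'
      set t := l'.foldl (wfStep w r) (g, m) with ht
      have hvx : pvGet t.1 (r x).1 (r x).2 = pvGet g (r x).1 (r x).2 := by
        exact ihU _ _ hrx.1 hrx.2 (fun i hi => hfx i hi x (List.mem_singleton_self x))
      have hSset : Shape (pvSet t.1 (w x).1 (w x).2 (pvGet t.1 (r x).1 (r x).2)) R C :=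
        shape_pvSet ihS hwx.1 _ _
      have hself : pvGet (pvSet t.1 (w x).1 (w x).2 (pvGet t.1 (r x).1 (r x).2))
          (w x).1 (w x).2 = pvGet t.1 (r x).1 (r x).2 :=
        pvGet_pvSet_self ihS hwx.1 hwx.2.1 hwx.2.2.1 hwx.2.2.2 _
      rw [List.foldl_append]
      refine ⟨?_, ?_, ?_, ?_⟩
      · simpa [wfStep] using hSset
      · intro i hi
        rcases List.mem_append.1 hi with hi | hi
        · have hne := pair_ne (hdx i hi x (List.mem_singleton_self x))
          show pvGet (pvSet t.1 (w x).1 (w x).2 (pvGet t.1 (r x).1 (r x).2)) (w i).1 (w i).2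
              = pvGet g (r i).1 (r i).2
          rw [pvGet_pvSet_ne hwx.1 hwx.2.2.1 (hwl' i hi).1 (hwl' i hi).2.2.1 hne _]
          exact ihV i hi
        · have hix : i = x := List.mem_singleton.1 hi
          subst hix
          show pvGet (pvSet t.1 (w i).1 (w i).2 (pvGet t.1 (r i).1 (r i).2)) (w i).1 (w i).2
              = pvGet g (r i).1 (r i).2
          rw [hself]
          exact hvx
      · intro p q hp hq hnt
        have hnx := hnt x (List.mem_append_right _ (List.mem_singleton_self x))
        show pvGet (pvSet t.1 (w x).1 (w x).2 (pvGet t.1 (r x).1 (r x).2)) p q = pvGet g p q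
        rw [pvGet_pvSet_ne hwx.1 hwx.2.2.1 hp hq (by rcases pair_ne hnx with h | h <;> tauto) _]
        exact ihU p q hp hq (fun i hi => hnt i (List.mem_append_left _ hi))
      · show (min t.2 (pvGet (pvSet t.1 (w x).1 (w x).2 (pvGet t.1 (r x).1 (r x).2)) (w x).1 (w x).2)) = _
        rw [hself, hvx, List.map_append, List.foldl_append, ihM]
        simp

theorem scatterFold_char (R C : Int) :
    ∀ (ps : List ((Int × Int) × Int)) (g : List (List Int)),
    Shape g R C →
    (∀ e ∈ ps, 0 ≤ e.1.1 ∧ e.1.1 < R ∧ 0 ≤ e.1.2 ∧ e.1.2 < C) →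
    ps.Pairwise (fun e e' => e.1 ≠ e'.1) →
    Shape (ps.foldl (fun h e => pvSet h e.1.1 e.1.2 e.2) g) R C ∧
    (∀ e ∈ ps, pvGet (ps.foldl (fun h e => pvSet h e.1.1 e.1.2 e.2) g) e.1.1 e.1.2 = e.2) ∧
    (∀ p q : Int, 0 ≤ p → 0 ≤ q → (∀ e ∈ ps, e.1 ≠ (p, q)) →
        pvGet (ps.foldl (fun h e => pvSet h e.1.1 e.1.2 e.2) g) p q = pvGet g p q) := by
  intro ps
  induction ps with
  | nil => intro g hS _ _; exact ⟨hS, by simp, fun _ _ _ _ _ => rfl⟩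
  | cons e t ih =>
      intro g hS hw hpw
      have hew := hw e List.mem_cons_self
      have htw : ∀ e' ∈ t, 0 ≤ e'.1.1 ∧ e'.1.1 < R ∧ 0 ≤ e'.1.2 ∧ e'.1.2 < C :=
        fun e' he' => hw e' (List.mem_cons_of_mem _ he')
      rw [List.pairwise_cons] at hpw
      obtain ⟨hhead, hpw'⟩ := hpw
      have hSset : Shape (pvSet g e.1.1 e.1.2 e.2) R C := shape_pvSet hS hew.1 _ _
      obtain ⟨ihS, ihV, ihU⟩ := ih (pvSet g e.1.1 e.1.2 e.2) hSset htw hpw'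
      simp only [List.foldl_cons]
      refine ⟨ihS, ?_, ?_⟩
      · intro e' he'
        rcases List.mem_cons.1 he' with rfl | he'
        · rw [ihU _ _ hew.1 hew.2.2.1
              (fun e'' he'' => by
                have := (hhead e'' he'').symm
                exact fun hc => this (by rw [hc]))]
          exact pvGet_pvSet_self hS hew.1 hew.2.1 hew.2.2.1 hew.2.2.2 _
        · exact ihV e' he'
      · intro p q hp hq hne
        rw [ihU p q hp hq (fun e'' he'' => hne e'' (List.mem_cons_of_mem _ he''))]
        exact pvGet_pvSet_ne hew.1 hew.2.2.1 hp hq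
          (by rcases pair_ne (hne e List.mem_cons_self) with h | h
              · exact Or.inl (by simpa using (Ne.symm h))
              · exact Or.inr (by simpa using (Ne.symm h))) _

theorem pvGet_of_getElem {g : List (List Int)} {n m : Nat}
    (hn : n < g.length) (hm : m < g[n].length) :
    pvGet g (n : Int) (m : Int) = g[n][m] := by
  unfold pvGet
  rw [PySem.List.pyGetD_natCast _ _ _, PySem.List.pyGetD_natCast _ _ _]
  simp [List.getD_eq_getElem?_getD, List.getElem?_eq_getElem hn,
        List.getElem?_eq_getElem hm]

theorem grid_ext {g h : List (List Int)} {R C : Int} (hg : Shape g R C) (hh : Shape h R C)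
    (he : ∀ p q : Int, 0 ≤ p → p < R → 0 ≤ q → q < C → pvGet g p q = pvGet h p q) :
    g = h := by
  obtain ⟨hgl, hgr⟩ := hg
  obtain ⟨hhl, hhr⟩ := hh
  apply List.ext_getElem (by omega)
  intro n h1 h2
  have hrg := hgr _ (List.getElem_mem h1)
  have hrh := hhr _ (List.getElem_mem h2)
  apply List.ext_getElem (by omega)
  intro m m1 m2
  have := he n m (by omega) (by omega) (by omega) (by omega)
  rwa [pvGet_of_getElem h1 m1, pvGet_of_getElem h2 m2] at this

theorem foldl_min_set_eq {x y : Int} {l l' : List Int}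
    (h : ∀ z : Int, z ∈ x :: l ↔ z ∈ y :: l') : l.foldl min x = l'.foldl min y := by
  have h1 := PySem.List.min?_id_cons x l
  have h2 := PySem.List.min?_id_cons y l'
  exact le_antisymm
    (PySem.List.min?_isMin h1 _ ((h _).mpr (PySem.List.min?_mem h2)))
    (PySem.List.min?_isMin h2 _ ((h _).mp (PySem.List.min?_mem h1)))

theorem buildB_shape (R C : Int) (hR : 0 ≤ R) (hC : 0 ≤ C) : Shape (buildB R C) R C := by
  constructor
  · simp [buildB, PySem.List.length_pyRange_one]; omega
  · intro row hr
    simp only [buildB, List.mem_map] at hr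
    obtain ⟨i, _, rfl⟩ := hr
    simp [PySem.List.length_pyRange_one]; omega

theorem buildB_get (R C : Int) {p q : Int} (hp : 0 ≤ p) (hpR : p < R) (hq : 0 ≤ q)
    (hqC : q < C) : pvGet (buildB R C) p q = p * C + q + 1 := by
  have ep : p = ((p.toNat : Nat) : Int) := by omega
  have eq' : q = ((q.toNat : Nat) : Int) := by omega
  have h1 : p.toNat < (PySem.List.pyRange 0 R).length := by
    rw [PySem.List.length_pyRange_one]; omega
  have h2 : q.toNat < (PySem.List.pyRange 0 C).length := by
    rw [PySem.List.length_pyRange_one]; omega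
  rw [ep, eq']
  unfold buildB
  rw [pvGet_of_getElem (by simpa using h1)
      (by simp only [List.getElem_map, List.length_map]; simpa using h2)]
  simp [PySem.List.getElem_pyRange_one]
  try ring

theorem buildA_inner (R C : Int) (i : Int) (hi0 : 0 ≤ i) (hiR : i < R) :
    ∀ (n : Nat) (a : Int), 0 ≤ a → a + n ≤ C →
    ∀ (g : List (List Int)) (num : Int), Shape g R C →
    Shape ((PySem.List.pyRange a (a + n) 1).foldl
        (fun s j => (pvSet s.1 i j s.2, s.2 + 1)) (g, num)).1 R C ∧
    ((PySem.List.pyRange a (a + n) 1).foldl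
        (fun s j => (pvSet s.1 i j s.2, s.2 + 1)) (g, num)).2 = num + n ∧
    (∀ p q : Int, 0 ≤ p → 0 ≤ q →
        pvGet ((PySem.List.pyRange a (a + n) 1).foldl
          (fun s j => (pvSet s.1 i j s.2, s.2 + 1)) (g, num)).1 p q
        = if p = i ∧ a ≤ q ∧ q < a + n then num + (q - a) else pvGet g p q) := by
  intro n
  induction n with
  | zero =>
      intro a ha haC g num hS
      simp only [Nat.cast_zero, add_zero, PySem.List.pyRange_one_eq_nil (le_refl a),
        List.foldl_nil]
      refine ⟨hS, by simp, ?_⟩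
      intro p q hp hq
      rw [if_neg (by omega)]
  | succ n ihn =>
      intro a ha haC g num hS
      have hcast : a + ((n + 1 : Nat) : Int) = (a + n) + 1 := by push_cast; ring
      rw [hcast, PySem.List.pyRange_one_succ_right (by omega), List.foldl_append,
        List.foldl_cons, List.foldl_nil]
      obtain ⟨ihS, ihN, ihC⟩ := ihn a ha (by push_cast at haC ⊢; omega) g num hS
      set t := (PySem.List.pyRange a (a + n) 1).foldl
        (fun s j => (pvSet s.1 i j s.2, s.2 + 1)) (g, num) with htdef
      refine ⟨shape_pvSet ihS hi0 _ _, by simp [ihN]; push_cast; ring, ?_⟩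
      intro p q hp hq
      by_cases hpq : p = i ∧ q = a + n
      · obtain ⟨rfl, rfl⟩ := hpq
        rw [pvGet_pvSet_self ihS hi0 hiR (by omega) (by push_cast at haC ⊢; omega) _,
          ihN, if_pos (by constructor <;> omega)]
        ring
      · have : p ≠ i ∨ q ≠ a + n := by tauto
        rw [pvGet_pvSet_ne hi0 (by omega) hp hq this _, ihC p q hp hq]
        by_cases hc : p = i ∧ a ≤ q ∧ q < a + n
        · rw [if_pos hc, if_pos (by push_cast; omega)]
        · rw [if_neg hc, if_neg (by push_cast at hc ⊢; omega)]

theorem buildA_outer (R C : Int) (hC : 0 ≤ C) :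
    ∀ (n : Nat), (n : Int) ≤ R →
    ∀ (g : List (List Int)) (num : Int), Shape g R C →
    Shape ((PySem.List.pyRange 0 (n : Int) 1).foldl (fun s i =>
        (PySem.List.pyRange 0 C 1).foldl (fun s j => (pvSet s.1 i j s.2, s.2 + 1)) s)
        (g, num)).1 R C ∧
    ((PySem.List.pyRange 0 (n : Int) 1).foldl (fun s i =>
        (PySem.List.pyRange 0 C 1).foldl (fun s j => (pvSet s.1 i j s.2, s.2 + 1)) s)
        (g, num)).2 = num + n * C ∧
    (∀ p q : Int, 0 ≤ p → 0 ≤ q → q < C →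
        pvGet ((PySem.List.pyRange 0 (n : Int) 1).foldl (fun s i =>
          (PySem.List.pyRange 0 C 1).foldl (fun s j => (pvSet s.1 i j s.2, s.2 + 1)) s)
          (g, num)).1 p q
        = if p < (n : Int) then num + p * C + q else pvGet g p q) := by
  intro n
  induction n with
  | zero =>
      intro hn g num hS
      simp only [Nat.cast_zero, PySem.List.pyRange_one_eq_nil (le_refl 0), List.foldl_nil]
      refine ⟨hS, by simp, ?_⟩
      intro p q hp hq hqC
      rw [if_neg (by omega)]
  | succ n ihn =>
      intro hn g num hS
      have hcast : ((n + 1 : Nat) : Int) = (n : Int) + 1 := by push_cast; ring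
      rw [hcast, PySem.List.pyRange_one_succ_right (by omega), List.foldl_append,
        List.foldl_cons, List.foldl_nil]
      obtain ⟨ihS, ihN, ihC⟩ := ihn (by omega) g num hS
      set t := (PySem.List.pyRange 0 (n : Int) 1).foldl (fun s i =>
        (PySem.List.pyRange 0 C 1).foldl (fun s j => (pvSet s.1 i j s.2, s.2 + 1)) s)
        (g, num) with htdef
      have hCe : (0 : Int) + ((C.toNat : Nat) : Int) = C := by omega
      have hinner := buildA_inner R C (n : Int) (by omega) (by omega) C.toNat 0
        (le_refl 0) (by omega) t.1 t.2 ihS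
      rw [hCe] at hinner
      obtain ⟨hiS, hiN, hiC⟩ := hinner
      have hCt : ((C.toNat : Nat) : Int) = C := by omega
      refine ⟨hiS, ?_, ?_⟩
      · rw [hiN, ihN, hCt]; ring
      · intro p q hp hq hqC
        rw [hiC p q hp hq, ihC p q hp hq hqC]
        by_cases hpn : p = (n : Int)
        · rw [if_pos ⟨hpn, hq, hqC⟩, if_pos (by omega), ihN, hpn]; ring
        · rw [if_neg (fun hh => hpn hh.1)]
          by_cases hlt : p < (n : Int)
          · rw [if_pos hlt, if_pos (by omega)]
          · rw [if_neg hlt, if_neg (by omega)]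

theorem buildA_eq (R C : Int) (hR : 0 < R) (hC : 0 < C) :
    buildA R C = buildB R C ∧ Shape (buildA R C) R C := by
  have hS0 : Shape (List.replicate R.toNat (List.replicate C.toNat (0 : Int))) R C := by
    constructor
    · simp; omega
    · intro row hr
      rw [List.eq_of_mem_replicate hr]
      simp; omega
  have hRe : ((R.toNat : Nat) : Int) = R := by omega
  have h := buildA_outer R C (by omega) R.toNat (by omega)
    (List.replicate R.toNat (List.replicate C.toNat 0)) 1 hS0
  rw [hRe] at h
  obtain ⟨hS, _, hG⟩ := h
  have hbS : Shape (buildA R C) R C := by unfold buildA; exact hS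
  refine ⟨grid_ext hbS (buildB_shape R C (by omega) (by omega)) ?_, hbS⟩
  intro p q hp hpR hq hqC
  unfold buildA
  rw [hG p q hp hq hqC, if_pos hpR, buildB_get R C hp hpR hq hqC]
  ring

-- the clockwise border walk and the predecessor of each border cell on it
def bCoords (x1 y1 x2 y2 : Int) : List (Int × Int) :=
  (PySem.List.pyRange y1 y2 1).map (fun j => (x1, j)) ++
  (PySem.List.pyRange x1 x2 1).map (fun i => (i, y2)) ++
  (PySem.List.pyRange y2 y1 (-1)).map (fun j => (x2, j)) ++
  (PySem.List.pyRange x2 x1 (-1)).map (fun i => (i, y1))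

def bPred (x1 y1 x2 y2 : Int) (c : Int × Int) : Int × Int :=
  if c.1 = x1 ∧ c.2 = y1 then (x1 + 1, y1)
  else if c.1 = x1 then (x1, c.2 - 1)
  else if c.2 = y2 then (c.1 - 1, y2)
  else if c.1 = x2 then (x2, c.2 + 1)
  else (c.1 + 1, c.2)

theorem mem_bCoords {x1 y1 x2 y2 : Int} (c : Int × Int) :
    c ∈ bCoords x1 y1 x2 y2 ↔
      ((c.1 = x1 ∧ y1 ≤ c.2 ∧ c.2 < y2) ∨ (c.2 = y2 ∧ x1 ≤ c.1 ∧ c.1 < x2) ∨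
       (c.1 = x2 ∧ y1 < c.2 ∧ c.2 ≤ y2) ∨ (c.2 = y1 ∧ x1 < c.1 ∧ c.1 ≤ x2)) := by
  simp only [bCoords, List.mem_append, List.mem_map, PySem.List.mem_pyRange_one,
    PySem.List.mem_pyRange_neg_one]
  constructor
  · rintro (((⟨j, hj, rfl⟩ | ⟨i, hi, rfl⟩) | ⟨j, hj, rfl⟩) | ⟨i, hi, rfl⟩)
    · exact Or.inl (by simp; omega)
    · exact Or.inr (Or.inl (by simp; omega))
    · exact Or.inr (Or.inr (Or.inl (by simp; omega)))
    · exact Or.inr (Or.inr (Or.inr (by simp; omega)))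
  · rcases c with ⟨u, v⟩
    rintro (⟨h, hv⟩ | ⟨h, hu⟩ | ⟨h, hv⟩ | ⟨h, hu⟩)
    · exact Or.inl (Or.inl (Or.inl ⟨v, by omega, by simp; omega⟩))
    · exact Or.inl (Or.inl (Or.inr ⟨u, by omega, by simp; omega⟩))
    · exact Or.inl (Or.inr ⟨v, by omega, by simp; omega⟩)
    · exact Or.inr ⟨u, by omega, by simp; omega⟩

theorem pairwise_gt_pyRange_neg_one (a b : Int) :
    (PySem.List.pyRange a b (-1)).Pairwise (fun u v => v < u) := by
  rw [PySem.List.pyRange_neg_one]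
  rw [List.pairwise_map]
  exact (List.pairwise_lt_range).imp (by intro u v h; omega)

theorem pairwise_ne_bCoords {x1 y1 x2 y2 : Int} (hx : x1 < x2) (hy : y1 < y2) :
    (bCoords x1 y1 x2 y2).Pairwise (fun u v => u ≠ v) := by
  unfold bCoords
  rw [List.pairwise_append]
  refine ⟨?_, ?_, ?_⟩
  · rw [List.pairwise_append]
    refine ⟨?_, ?_, ?_⟩
    · rw [List.pairwise_append]
      refine ⟨?_, ?_, ?_⟩
      · rw [List.pairwise_map]
        exact (PySem.List.pairwise_lt_pyRange_one y1 y2).imp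
          (by intro u v h heq; simp [Prod.ext_iff] at heq; omega)
      · rw [List.pairwise_map]
        exact (PySem.List.pairwise_lt_pyRange_one x1 x2).imp
          (by intro u v h heq; simp [Prod.ext_iff] at heq; omega)
      · intro u hu v hv
        simp only [List.mem_map, PySem.List.mem_pyRange_one] at hu hv
        obtain ⟨j, hj, rfl⟩ := hu
        obtain ⟨i, hi, rfl⟩ := hv
        intro heq; simp [Prod.ext_iff] at heq; omega
    · rw [List.pairwise_map]
      exact (pairwise_gt_pyRange_neg_one y2 y1).imp
        (by intro u v h heq; simp [Prod.ext_iff] at heq; omega)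
    · intro u hu v hv
      simp only [List.mem_map, List.mem_append, PySem.List.mem_pyRange_one,
        PySem.List.mem_pyRange_neg_one] at hu hv
      obtain ⟨j, hj, rfl⟩ := hv
      rcases hu with ⟨i, hi, rfl⟩ | ⟨i, hi, rfl⟩ <;>
        (intro heq; simp [Prod.ext_iff] at heq; omega)
  · rw [List.pairwise_map]
    exact (pairwise_gt_pyRange_neg_one x2 x1).imp
      (by intro u v h heq; simp [Prod.ext_iff] at heq; omega)
  · intro u hu v hv
    simp only [List.mem_map, List.mem_append, PySem.List.mem_pyRange_one,
      PySem.List.mem_pyRange_neg_one] at hu hv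
    obtain ⟨i, hi, rfl⟩ := hv
    rcases hu with (⟨j, hj, rfl⟩ | ⟨j, hj, rfl⟩) | ⟨j, hj, rfl⟩ <;>
      (intro heq; simp [Prod.ext_iff] at heq; omega)

theorem length_bCoords (x1 y1 x2 y2 : Int) :
    (bCoords x1 y1 x2 y2).length
      = (y2 - y1).toNat + (x2 - x1).toNat + (y2 - y1).toNat + (x2 - x1).toNat := by
  simp [bCoords, PySem.List.length_pyRange_one, PySem.List.length_pyRange_neg_one]
  omega

theorem getElem_bCoords {x1 y1 x2 y2 : Int} (hx : x1 < x2) (hy : y1 < y2) (k : Nat)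
    (hk : k < (bCoords x1 y1 x2 y2).length) :
    (bCoords x1 y1 x2 y2)[k] =
      if k < (y2 - y1).toNat then (x1, y1 + (k : Int))
      else if k < (y2 - y1).toNat + (x2 - x1).toNat then
        (x1 + ((k : Int) - (y2 - y1)), y2)
      else if k < (y2 - y1).toNat + (x2 - x1).toNat + (y2 - y1).toNat then
        (x2, y2 - ((k : Int) - ((y2 - y1) + (x2 - x1))))
      else (x2 - ((k : Int) - (2 * (y2 - y1) + (x2 - x1))), y1) := by
  have hN := length_bCoords x1 y1 x2 y2
  have l1 : (List.map (fun j => ((x1 : Int), j)) (PySem.List.pyRange y1 y2)).length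
      = (y2 - y1).toNat := by simp [PySem.List.length_pyRange_one]
  have l2 : (List.map (fun i => (i, (y2 : Int))) (PySem.List.pyRange x1 x2)).length
      = (x2 - x1).toNat := by simp [PySem.List.length_pyRange_one]
  have l3 : (List.map (fun j => ((x2 : Int), j)) (PySem.List.pyRange y2 y1 (-1))).length
      = (y2 - y1).toNat := by simp [PySem.List.length_pyRange_neg_one]
  rw [length_bCoords] at hk
  unfold bCoords
  by_cases c1 : k < (y2 - y1).toNat
  · rw [if_pos c1,
      List.getElem_append_left (by simp only [List.length_append, l1, l2, l3]; omega),
      List.getElem_append_left (by simp only [List.length_append, l1, l2]; omega),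
      List.getElem_append_left (by omega)]
    simp [PySem.List.getElem_pyRange_one]
  · rw [if_neg c1]
    by_cases c2 : k < (y2 - y1).toNat + (x2 - x1).toNat
    · rw [if_pos c2,
        List.getElem_append_left (by simp only [List.length_append, l1, l2, l3]; omega),
        List.getElem_append_left (by simp only [List.length_append, l1, l2]; omega),
        List.getElem_append_right (by omega)]
      simp only [List.getElem_map, PySem.List.getElem_pyRange_one, l1]
      apply Prod.ext <;> simp <;> push_cast <;> omega
    · rw [if_neg c2]
      by_cases c3 : k < (y2 - y1).toNat + (x2 - x1).toNat + (y2 - y1).toNat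
      · rw [if_pos c3,
          List.getElem_append_left (by simp only [List.length_append, l1, l2, l3]; omega),
          List.getElem_append_right (by simp only [List.length_append, l1, l2]; omega)]
        simp only [PySem.List.pyRange_neg_one, List.getElem_map, List.getElem_range,
          List.length_append, l1, l2]
        apply Prod.ext <;> simp <;> push_cast <;> omega
      · rw [if_neg c3,
          List.getElem_append_right (by simp only [List.length_append, l1, l2, l3]; omega)]
        simp only [PySem.List.pyRange_neg_one, List.getElem_map, List.getElem_range,
          List.length_append, l1, l2, l3]
        apply Prod.ext <;> simp <;> push_cast <;> omega

theorem bCoords_zero {x1 y1 x2 y2 : Int} (hx : x1 < x2) (hy : y1 < y2)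
    (h : 0 < (bCoords x1 y1 x2 y2).length) : (bCoords x1 y1 x2 y2)[0] = (x1, y1) := by
  rw [getElem_bCoords hx hy 0 h, if_pos (by omega)]
  simp

theorem bCoords_last {x1 y1 x2 y2 : Int} (hx : x1 < x2) (hy : y1 < y2)
    (h : (bCoords x1 y1 x2 y2).length - 1 < (bCoords x1 y1 x2 y2).length) :
    (bCoords x1 y1 x2 y2)[(bCoords x1 y1 x2 y2).length - 1] = (x1 + 1, y1) := by
  have hN := length_bCoords x1 y1 x2 y2
  rw [getElem_bCoords hx hy _ h, hN, if_neg (by omega), if_neg (by omega),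
    if_neg (by omega)]
  apply Prod.ext <;> simp <;> push_cast <;> omega

set_option maxHeartbeats 1000000 in
theorem bCoords_adj {x1 y1 x2 y2 : Int} (hx : x1 < x2) (hy : y1 < y2) (k : Nat)
    (h0 : 0 < k) (hk : k < (bCoords x1 y1 x2 y2).length)
    (hk' : k - 1 < (bCoords x1 y1 x2 y2).length) :
    (bCoords x1 y1 x2 y2)[k - 1] = bPred x1 y1 x2 y2 ((bCoords x1 y1 x2 y2)[k]) := by
  have hN := length_bCoords x1 y1 x2 y2
  have hkN := hk
  rw [hN] at hkN
  have eK := getElem_bCoords hx hy k hk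
  have eK1 := getElem_bCoords hx hy (k - 1) hk'
  by_cases cA : k < (y2 - y1).toNat
  · rw [if_pos cA] at eK
    rw [if_pos (by omega)] at eK1
    rw [eK, eK1]
    unfold bPred
    split_ifs <;> dsimp only at * <;> apply Prod.ext <;> simp <;> push_cast <;> omega
  · by_cases cB : k < (y2 - y1).toNat + (x2 - x1).toNat
    · rw [if_neg cA, if_pos cB] at eK
      rw [eK]
      by_cases cB1 : k - 1 < (y2 - y1).toNat
      · rw [if_pos cB1] at eK1
        rw [eK1]
        unfold bPred
        split_ifs <;> dsimp only at * <;> apply Prod.ext <;> simp <;> push_cast <;> omega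
      · rw [if_neg cB1, if_pos (by omega)] at eK1
        rw [eK1]
        unfold bPred
        split_ifs <;> dsimp only at * <;> apply Prod.ext <;> simp <;> push_cast <;> omega
    · by_cases cC : k < (y2 - y1).toNat + (x2 - x1).toNat + (y2 - y1).toNat
      · rw [if_neg cA, if_neg cB, if_pos cC] at eK
        rw [eK]
        by_cases cC1 : k - 1 < (y2 - y1).toNat + (x2 - x1).toNat
        · rw [if_neg (by omega), if_pos (by omega)] at eK1
          rw [eK1]
          unfold bPred
          split_ifs <;> dsimp only at * <;> apply Prod.ext <;> simp <;> push_cast <;> omega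
        · rw [if_neg (by omega), if_neg (by omega), if_pos (by omega)] at eK1
          rw [eK1]
          unfold bPred
          split_ifs <;> dsimp only at * <;> apply Prod.ext <;> simp <;> push_cast <;> omega
      · rw [if_neg cA, if_neg cB, if_neg cC] at eK
        rw [eK]
        by_cases cD1 : k - 1 < (y2 - y1).toNat + (x2 - x1).toNat + (y2 - y1).toNat
        · rw [if_neg (by omega), if_neg (by omega), if_pos (by omega)] at eK1
          rw [eK1]
          unfold bPred
          split_ifs <;> dsimp only at * <;> apply Prod.ext <;> simp <;> push_cast <;> omega
        · rw [if_neg (by omega), if_neg (by omega), if_neg (by omega)] at eK1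
          rw [eK1]
          unfold bPred
          split_ifs <;> dsimp only at * <;> apply Prod.ext <;> simp <;> push_cast <;> omega

theorem zip_rotated (g : List (List Int)) {x1 y1 x2 y2 : Int}
    (hx : x1 < x2) (hy : y1 < y2) :
    (bCoords x1 y1 x2 y2).zip
      (PySem.List.pyGetD ((bCoords x1 y1 x2 y2).map (fun c => pvGet g c.1 c.2)) (-1) 0 ::
        PySem.List.slice ((bCoords x1 y1 x2 y2).map (fun c => pvGet g c.1 c.2)) none (some (-1)))
    = (bCoords x1 y1 x2 y2).map (fun c =>
        (c, pvGet g (bPred x1 y1 x2 y2 c).1 (bPred x1 y1 x2 y2 c).2)) := by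
  have hN := length_bCoords x1 y1 x2 y2
  have hpos : 0 < (bCoords x1 y1 x2 y2).length := by rw [hN]; omega
  have hvne : (bCoords x1 y1 x2 y2).map (fun c => pvGet g c.1 c.2) ≠ [] := by
    apply List.ne_nil_of_length_pos
    rw [List.length_map, hN]
    omega
  rw [PySem.List.pyGetD_neg_one _ _ hvne, PySem.List.slice_to_neg_one]
  have hhead : ((bCoords x1 y1 x2 y2).map (fun c => pvGet g c.1 c.2)).getLast hvne
      = pvGet g (x1 + 1) y1 := by
    rw [List.getLast_eq_getElem]
    simp only [List.length_map, List.getElem_map]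
    rw [bCoords_last hx hy (by omega)]
  apply List.ext_getElem
  · rw [List.length_zip, List.length_map, List.length_cons, List.length_dropLast,
      List.length_map]
    omega
  · intro k h1 h2
    rw [List.getElem_zip, List.getElem_map]
    have hkc : k < (bCoords x1 y1 x2 y2).length := by simpa using h2
    apply Prod.ext
    · simp
    · show _ = pvGet g (bPred x1 y1 x2 y2 ((bCoords x1 y1 x2 y2)[k])).1
        (bPred x1 y1 x2 y2 ((bCoords x1 y1 x2 y2)[k])).2
      cases k with
      | zero =>
          show ((bCoords x1 y1 x2 y2).map (fun c => pvGet g c.1 c.2)).getLast hvne = _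
          rw [hhead, bCoords_zero hx hy hpos]
          unfold bPred
          rw [if_pos (⟨rfl, rfl⟩ : (x1, y1).1 = x1 ∧ (x1, y1).2 = y1)]
      | succ k =>
          show ((bCoords x1 y1 x2 y2).map (fun c => pvGet g c.1 c.2)).dropLast[k]'(by
              simp only [List.length_dropLast, List.length_map]; omega) = _
          rw [List.getElem_dropLast, List.getElem_map]
          have hadj := bCoords_adj hx hy (k + 1) (Nat.succ_pos k) hkc (by omega)
          simp only [Nat.add_sub_cancel] at hadj
          rw [hadj]

set_option maxHeartbeats 2000000 in
theorem step_eq (R C : Int) (g : List (List Int)) (ans : List Int)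
    (a b c d : Int) (hS : Shape g R C)
    (h1 : 1 ≤ a) (h2 : a < c) (h3 : c ≤ R) (h4 : 1 ≤ b) (h5 : b < d) (h6 : d ≤ C) :
    stepA (g, ans) (a, b, c, d) = stepB (g, ans) (a, b, c, d) ∧
    Shape (stepA (g, ans) (a, b, c, d)).1 R C := by
  simp only [stepA, stepB]
  -- fold the four shift loops into their canonical wfStep form
  rw [show (fun (t : List (List Int) × Int) (i : Int) =>
        (pvSet t.1 i (b - 1) (pvGet t.1 (i + 1) (b - 1)),
          min t.2 (pvGet (pvSet t.1 i (b - 1) (pvGet t.1 (i + 1) (b - 1))) i (b - 1))))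
      = wfStep (fun i => (i, b - 1)) (fun i => (i + 1, b - 1)) from rfl,
    show (fun (t : List (List Int) × Int) (i : Int) =>
        (pvSet t.1 (c - 1) i (pvGet t.1 (c - 1) (i + 1)),
          min t.2 (pvGet (pvSet t.1 (c - 1) i (pvGet t.1 (c - 1) (i + 1))) (c - 1) i)))
      = wfStep (fun i => (c - 1, i)) (fun i => (c - 1, i + 1)) from rfl,
    show (fun (t : List (List Int) × Int) (i : Int) =>
        (pvSet t.1 i (d - 1) (pvGet t.1 (i - 1) (d - 1)),
          min t.2 (pvGet (pvSet t.1 i (d - 1) (pvGet t.1 (i - 1) (d - 1))) i (d - 1))))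
      = wfStep (fun i => (i, d - 1)) (fun i => (i - 1, d - 1)) from rfl,
    show (fun (t : List (List Int) × Int) (i : Int) =>
        (pvSet t.1 (a - 1) i (pvGet t.1 (a - 1) (i - 1)),
          min t.2 (pvGet (pvSet t.1 (a - 1) i (pvGet t.1 (a - 1) (i - 1))) (a - 1) i)))
      = wfStep (fun i => (a - 1, i)) (fun i => (a - 1, i - 1)) from rfl,
    show (List.map (fun j => ((a - 1 : Int), j)) (PySem.List.pyRange (b - 1) (d - 1)) ++
          List.map (fun i => (i, (d - 1 : Int))) (PySem.List.pyRange (a - 1) (c - 1)) ++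
          List.map (fun j => ((c - 1 : Int), j)) (PySem.List.pyRange (d - 1) (b - 1) (-1)) ++
          List.map (fun i => (i, (b - 1 : Int))) (PySem.List.pyRange (c - 1) (a - 1) (-1)))
      = bCoords (a - 1) (b - 1) (c - 1) (d - 1) from rfl]
  have hx : a - 1 < c - 1 := by omega
  have hy : b - 1 < d - 1 := by omega
  rw [zip_rotated g hx hy]
  -- characterize A's four loops
  have HA1 := writeFold_char (fun i => (i, b - 1)) (fun i => (i + 1, b - 1)) R C
    (PySem.List.pyRange (a - 1) (c - 1)) g (pvGet g (a - 1) (b - 1)) hS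
    (by intro i hi; rw [PySem.List.mem_pyRange_one] at hi; dsimp only; omega)
    (by intro i hi; rw [PySem.List.mem_pyRange_one] at hi; dsimp only; omega)
    ((PySem.List.pairwise_lt_pyRange_one _ _).imp
      (by intro u v h heq; simp [Prod.ext_iff] at heq; omega))
    ((PySem.List.pairwise_lt_pyRange_one _ _).imp
      (by intro u v h heq; simp [Prod.ext_iff] at heq; omega))
  obtain ⟨S1, V1, U1, M1⟩ := HA1
  set T1 := List.foldl (wfStep (fun i => (i, b - 1)) (fun i => (i + 1, b - 1)))
    (g, pvGet g (a - 1) (b - 1)) (PySem.List.pyRange (a - 1) (c - 1)) with hT1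
  have HA2 := writeFold_char (fun i => (c - 1, i)) (fun i => (c - 1, i + 1)) R C
    (PySem.List.pyRange (b - 1) (d - 1)) T1.1 T1.2 S1
    (by intro i hi; rw [PySem.List.mem_pyRange_one] at hi; dsimp only; omega)
    (by intro i hi; rw [PySem.List.mem_pyRange_one] at hi; dsimp only; omega)
    ((PySem.List.pairwise_lt_pyRange_one _ _).imp
      (by intro u v h heq; simp [Prod.ext_iff] at heq; omega))
    ((PySem.List.pairwise_lt_pyRange_one _ _).imp
      (by intro u v h heq; simp [Prod.ext_iff] at heq; omega))
  rw [Prod.mk.eta] at HA2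
  obtain ⟨S2, V2, U2, M2⟩ := HA2
  set T2 := List.foldl (wfStep (fun i => (c - 1, i)) (fun i => (c - 1, i + 1)))
    T1 (PySem.List.pyRange (b - 1) (d - 1)) with hT2
  have HA3 := writeFold_char (fun i => (i, d - 1)) (fun i => (i - 1, d - 1)) R C
    (PySem.List.pyRange (c - 1) (a - 1) (-1)) T2.1 T2.2 S2
    (by intro i hi; rw [PySem.List.mem_pyRange_neg_one] at hi; dsimp only; omega)
    (by intro i hi; rw [PySem.List.mem_pyRange_neg_one] at hi; dsimp only; omega)
    ((pairwise_gt_pyRange_neg_one _ _).imp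
      (by intro u v h heq; simp [Prod.ext_iff] at heq; omega))
    ((pairwise_gt_pyRange_neg_one _ _).imp
      (by intro u v h heq; simp [Prod.ext_iff] at heq; omega))
  rw [Prod.mk.eta] at HA3
  obtain ⟨S3, V3, U3, M3⟩ := HA3
  set T3 := List.foldl (wfStep (fun i => (i, d - 1)) (fun i => (i - 1, d - 1)))
    T2 (PySem.List.pyRange (c - 1) (a - 1) (-1)) with hT3
  have HA4 := writeFold_char (fun i => (a - 1, i)) (fun i => (a - 1, i - 1)) R C
    (PySem.List.pyRange (d - 1) (b - 1) (-1)) T3.1 T3.2 S3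
    (by intro i hi; rw [PySem.List.mem_pyRange_neg_one] at hi; dsimp only; omega)
    (by intro i hi; rw [PySem.List.mem_pyRange_neg_one] at hi; dsimp only; omega)
    ((pairwise_gt_pyRange_neg_one _ _).imp
      (by intro u v h heq; simp [Prod.ext_iff] at heq; omega))
    ((pairwise_gt_pyRange_neg_one _ _).imp
      (by intro u v h heq; simp [Prod.ext_iff] at heq; omega))
  rw [Prod.mk.eta] at HA4
  obtain ⟨S4, V4, U4, M4⟩ := HA4
  set T4 := List.foldl (wfStep (fun i => (a - 1, i)) (fun i => (a - 1, i - 1)))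
    T3 (PySem.List.pyRange (d - 1) (b - 1) (-1)) with hT4
  -- characterize B's scatter
  have HB := scatterFold_char R C
    ((bCoords (a - 1) (b - 1) (c - 1) (d - 1)).map (fun cc =>
      (cc, pvGet g (bPred (a - 1) (b - 1) (c - 1) (d - 1) cc).1
            (bPred (a - 1) (b - 1) (c - 1) (d - 1) cc).2))) g hS
    (by intro e he
        rw [List.mem_map] at he
        obtain ⟨cc, hcc, rfl⟩ := he
        rw [mem_bCoords] at hcc
        dsimp only
        rcases hcc with h | h | h | h <;> omega)
    (by rw [List.pairwise_map]
        exact (pairwise_ne_bCoords hx hy).imp (by intro u v h heq; exact h heq))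
  obtain ⟨SB, VB, UB⟩ := HB
  set GB := List.foldl (fun h e => pvSet h e.1.1 e.1.2 e.2) g
    ((bCoords (a - 1) (b - 1) (c - 1) (d - 1)).map (fun cc =>
      (cc, pvGet g (bPred (a - 1) (b - 1) (c - 1) (d - 1) cc).1
            (bPred (a - 1) (b - 1) (c - 1) (d - 1) cc).2))) with hGB
  -- friendly forms of the per-loop characterizations
  have v1 : ∀ i : Int, a - 1 ≤ i → i < c - 1 →
      pvGet T1.1 i (b - 1) = pvGet g (i + 1) (b - 1) := by
    intro i hi1 hi2
    have := V1 i (by rw [PySem.List.mem_pyRange_one]; omega)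
    dsimp only at this; exact this
  have v2 : ∀ i : Int, b - 1 ≤ i → i < d - 1 →
      pvGet T2.1 (c - 1) i = pvGet T1.1 (c - 1) (i + 1) := by
    intro i hi1 hi2
    have := V2 i (by rw [PySem.List.mem_pyRange_one]; omega)
    dsimp only at this; exact this
  have v3 : ∀ i : Int, a - 1 < i → i ≤ c - 1 →
      pvGet T3.1 i (d - 1) = pvGet T2.1 (i - 1) (d - 1) := by
    intro i hi1 hi2
    have := V3 i (by rw [PySem.List.mem_pyRange_neg_one]; omega)
    dsimp only at this; exact this
  have v4 : ∀ i : Int, b - 1 < i → i ≤ d - 1 →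
      pvGet T4.1 (a - 1) i = pvGet T3.1 (a - 1) (i - 1) := by
    intro i hi1 hi2
    have := V4 i (by rw [PySem.List.mem_pyRange_neg_one]; omega)
    dsimp only at this; exact this
  have u1 : ∀ p q : Int, 0 ≤ p → 0 ≤ q → (q ≠ b - 1 ∨ p < a - 1 ∨ c - 1 ≤ p) →
      pvGet T1.1 p q = pvGet g p q := by
    intro p q hp hq hcond
    refine U1 p q hp hq ?_
    intro i hi
    rw [PySem.List.mem_pyRange_one] at hi
    dsimp only
    intro heq; rw [Prod.mk.injEq] at heq; omega
  have u2 : ∀ p q : Int, 0 ≤ p → 0 ≤ q → (p ≠ c - 1 ∨ q < b - 1 ∨ d - 1 ≤ q) →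
      pvGet T2.1 p q = pvGet T1.1 p q := by
    intro p q hp hq hcond
    refine U2 p q hp hq ?_
    intro i hi
    rw [PySem.List.mem_pyRange_one] at hi
    dsimp only
    intro heq; rw [Prod.mk.injEq] at heq; omega
  have u3 : ∀ p q : Int, 0 ≤ p → 0 ≤ q → (q ≠ d - 1 ∨ p ≤ a - 1 ∨ c - 1 < p) →
      pvGet T3.1 p q = pvGet T2.1 p q := by
    intro p q hp hq hcond
    refine U3 p q hp hq ?_
    intro i hi
    rw [PySem.List.mem_pyRange_neg_one] at hi
    dsimp only
    intro heq; rw [Prod.mk.injEq] at heq; omega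
  have u4 : ∀ p q : Int, 0 ≤ p → 0 ≤ q → (p ≠ a - 1 ∨ q ≤ b - 1 ∨ d - 1 < q) →
      pvGet T4.1 p q = pvGet T3.1 p q := by
    intro p q hp hq hcond
    refine U4 p q hp hq ?_
    intro i hi
    rw [PySem.List.mem_pyRange_neg_one] at hi
    dsimp only
    intro heq; rw [Prod.mk.injEq] at heq; omega
  have ufin : ∀ p q : Int, 0 ≤ p → 0 ≤ q → (p ≠ a - 1 ∨ q ≠ b - 1 + 1) →
      pvGet (pvSet T4.1 (a - 1) (b - 1 + 1) (pvGet g (a - 1) (b - 1))) p q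
        = pvGet T4.1 p q := by
    intro p q hp hq hcond
    exact pvGet_pvSet_ne (by omega) (by omega) hp hq (by tauto) _
  have vfin : pvGet (pvSet T4.1 (a - 1) (b - 1 + 1) (pvGet g (a - 1) (b - 1)))
      (a - 1) (b - 1 + 1) = pvGet g (a - 1) (b - 1) :=
    pvGet_pvSet_self S4 (by omega) (by omega) (by omega) (by omega) _
  have hBV : ∀ u v : Int, (u, v) ∈ bCoords (a - 1) (b - 1) (c - 1) (d - 1) →
      pvGet GB u v
        = pvGet g (bPred (a - 1) (b - 1) (c - 1) (d - 1) (u, v)).1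
            (bPred (a - 1) (b - 1) (c - 1) (d - 1) (u, v)).2 := by
    intro u v hm
    have := VB _ (List.mem_map_of_mem hm)
    dsimp only at this; exact this
  have hBU : ∀ u v : Int, 0 ≤ u → 0 ≤ v →
      ¬((u, v) ∈ bCoords (a - 1) (b - 1) (c - 1) (d - 1)) →
      pvGet GB u v = pvGet g u v := by
    intro u v hu hv hn
    refine UB u v hu hv ?_
    intro e he
    rw [List.mem_map] at he
    obtain ⟨cc, hcc, rfl⟩ := he
    dsimp only
    intro heq
    exact hn (heq ▸ hcc)
  -- the shape of A's final grid
  have hSA : Shape (pvSet T4.1 (a - 1) (b - 1 + 1) (pvGet g (a - 1) (b - 1))) R C :=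
    shape_pvSet S4 (by omega) _ _
  -- pointwise equality of the two final grids
  have hgrid : pvSet T4.1 (a - 1) (b - 1 + 1) (pvGet g (a - 1) (b - 1)) = GB := by
    refine grid_ext hSA SB ?_
    intro p q hp hpR hq hqC
    by_cases c1 : p = a - 1 ∧ b - 1 ≤ q ∧ q < d - 1
    · obtain ⟨rfl, hq1, hq2⟩ := c1
      have hmem : ((a - 1 : Int), q) ∈ bCoords (a - 1) (b - 1) (c - 1) (d - 1) := by
        rw [mem_bCoords]; exact Or.inl ⟨rfl, by omega, by omega⟩
      rw [hBV _ _ hmem]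
      by_cases hqb : q = b - 1
      · subst hqb
        have hpred : bPred (a - 1) (b - 1) (c - 1) (d - 1) (a - 1, b - 1)
            = (a - 1 + 1, b - 1) := by
          unfold bPred; dsimp only; rw [if_pos ⟨rfl, rfl⟩]
        rw [hpred]
        rw [ufin _ _ hp hq (by omega), u4 _ _ hp hq (by omega), u3 _ _ hp hq (by omega),
          u2 _ _ hp hq (by omega), v1 _ (by omega) (by omega)]
      · have hpred : bPred (a - 1) (b - 1) (c - 1) (d - 1) (a - 1, q)
            = (a - 1, q - 1) := by
          unfold bPred; dsimp only
          rw [if_neg (by intro hh; exact hqb hh.2), if_pos rfl]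
        rw [hpred]
        by_cases hq1' : q = b - 1 + 1
        · subst hq1'
          rw [vfin]
          congr 1
          omega
        · rw [ufin _ _ hp hq (by omega), v4 _ (by omega) (by omega),
            u3 _ _ (by omega) (by omega) (by omega), u2 _ _ (by omega) (by omega) (by omega),
            u1 _ _ (by omega) (by omega) (by omega)]
    · by_cases c2 : q = d - 1 ∧ a - 1 ≤ p ∧ p < c - 1
      · obtain ⟨rfl, hp1, hp2⟩ := c2
        have hmem : (p, (d - 1 : Int)) ∈ bCoords (a - 1) (b - 1) (c - 1) (d - 1) := by
          rw [mem_bCoords]; exact Or.inr (Or.inl ⟨rfl, by omega, by omega⟩)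
        rw [hBV _ _ hmem]
        by_cases hpa : p = a - 1
        · subst hpa
          have hpred : bPred (a - 1) (b - 1) (c - 1) (d - 1) (a - 1, d - 1)
              = (a - 1, d - 1 - 1) := by
            unfold bPred; dsimp only
            rw [if_neg (by intro hh; omega), if_pos rfl]
          rw [hpred]
          by_cases hdb : d - 1 = b - 1 + 1
          · rw [hdb, vfin]
            congr 1
            omega
          · rw [ufin _ _ hp hq (by omega), v4 _ (by omega) (by omega),
              u3 _ _ (by omega) (by omega) (by omega), u2 _ _ (by omega) (by omega) (by omega),
              u1 _ _ (by omega) (by omega) (by omega)]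
        · have hpred : bPred (a - 1) (b - 1) (c - 1) (d - 1) (p, d - 1)
              = (p - 1, d - 1) := by
            unfold bPred; dsimp only
            rw [if_neg (by intro hh; exact hpa hh.1), if_neg hpa, if_pos rfl]
          rw [hpred]
          rw [ufin _ _ hp hq (by omega), u4 _ _ hp hq (by omega), v3 _ (by omega) (by omega),
            u2 _ _ (by omega) (by omega) (by omega), u1 _ _ (by omega) (by omega) (by omega)]
      · by_cases c3 : p = c - 1 ∧ b - 1 < q ∧ q ≤ d - 1
        · obtain ⟨rfl, hq1, hq2⟩ := c3
          have hmem : ((c - 1 : Int), q) ∈ bCoords (a - 1) (b - 1) (c - 1) (d - 1) := by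
            rw [mem_bCoords]; exact Or.inr (Or.inr (Or.inl ⟨rfl, by omega, by omega⟩))
          rw [hBV _ _ hmem]
          by_cases hqd : q = d - 1
          · subst hqd
            have hpred : bPred (a - 1) (b - 1) (c - 1) (d - 1) (c - 1, d - 1)
                = (c - 1 - 1, d - 1) := by
              unfold bPred; dsimp only
              rw [if_neg (by intro hh; omega), if_neg (by omega), if_pos rfl]
            rw [hpred]
            rw [ufin _ _ hp hq (by omega), u4 _ _ hp hq (by omega),
              v3 _ (by omega) (by omega), u2 _ _ (by omega) (by omega) (by omega),
              u1 _ _ (by omega) (by omega) (by omega)]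
          · have hpred : bPred (a - 1) (b - 1) (c - 1) (d - 1) (c - 1, q)
                = (c - 1, q + 1) := by
              unfold bPred; dsimp only
              rw [if_neg (by intro hh; omega), if_neg (by omega), if_neg hqd, if_pos rfl]
            rw [hpred]
            rw [ufin _ _ hp hq (by omega), u4 _ _ hp hq (by omega),
              u3 _ _ hp hq (by omega), v2 _ (by omega) (by omega),
              u1 _ _ (by omega) (by omega) (by omega)]
        · by_cases c4 : q = b - 1 ∧ a - 1 < p ∧ p ≤ c - 1
          · obtain ⟨rfl, hp1, hp2⟩ := c4
            have hmem : (p, (b - 1 : Int)) ∈ bCoords (a - 1) (b - 1) (c - 1) (d - 1) := by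
              rw [mem_bCoords]; exact Or.inr (Or.inr (Or.inr ⟨rfl, by omega, by omega⟩))
            rw [hBV _ _ hmem]
            by_cases hpc : p = c - 1
            · subst hpc
              have hpred : bPred (a - 1) (b - 1) (c - 1) (d - 1) (c - 1, b - 1)
                  = (c - 1, b - 1 + 1) := by
                unfold bPred; dsimp only
                rw [if_neg (by intro hh; omega), if_neg (by omega), if_neg (by omega),
                  if_pos rfl]
              rw [hpred]
              rw [ufin _ _ hp hq (by omega), u4 _ _ hp hq (by omega),
                u3 _ _ hp hq (by omega), v2 _ (by omega) (by omega),
                u1 _ _ (by omega) (by omega) (by omega)]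
            · have hpred : bPred (a - 1) (b - 1) (c - 1) (d - 1) (p, b - 1)
                  = (p + 1, b - 1) := by
                unfold bPred; dsimp only
                rw [if_neg (by intro hh; omega), if_neg (by omega), if_neg (by omega),
                  if_neg hpc]
              rw [hpred]
              rw [ufin _ _ hp hq (by omega), u4 _ _ hp hq (by omega),
                u3 _ _ hp hq (by omega), u2 _ _ hp hq (by omega),
                v1 _ (by omega) (by omega)]
          · -- interior / exterior cell: untouched on both sides
            have hnmem : ¬((p, q) ∈ bCoords (a - 1) (b - 1) (c - 1) (d - 1)) := by
              rw [mem_bCoords]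
              dsimp only
              omega
            rw [hBU _ _ hp hq hnmem]
            rw [ufin _ _ hp hq (by omega), u4 _ _ hp hq (by omega),
              u3 _ _ hp hq (by omega), u2 _ _ hp hq (by omega),
              u1 _ _ hp hq (by omega)]
  -- translate the four running-min contributions back to reads of the original grid
  have hq4 : T4.2 = ((PySem.List.pyRange (d - 1) (b - 1) (-1)).map (fun i =>
      if i = b - 1 + 1 then pvGet g (a - 1 + 1) (b - 1) else pvGet g (a - 1) (i - 1))).foldl
        min T3.2 := by
    rw [M4]; congr 1
    refine List.map_congr_left ?_
    intro i hi
    rw [PySem.List.mem_pyRange_neg_one] at hi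
    dsimp only
    by_cases hib : i = b - 1 + 1
    · rw [if_pos hib, hib, show (b - 1 + 1 - 1 : Int) = b - 1 by omega,
        u3 _ _ (by omega) (by omega) (by omega), u2 _ _ (by omega) (by omega) (by omega),
        v1 _ (by omega) (by omega)]
    · rw [if_neg hib,
        u3 _ _ (by omega) (by omega) (by omega), u2 _ _ (by omega) (by omega) (by omega),
        u1 _ _ (by omega) (by omega) (by omega)]
  have hq3 : T3.2 = ((PySem.List.pyRange (c - 1) (a - 1) (-1)).map (fun i =>
      pvGet g (i - 1) (d - 1))).foldl min T2.2 := by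
    rw [M3]; congr 1
    refine List.map_congr_left ?_
    intro i hi
    rw [PySem.List.mem_pyRange_neg_one] at hi
    dsimp only
    rw [u2 _ _ (by omega) (by omega) (by omega), u1 _ _ (by omega) (by omega) (by omega)]
  have hq2 : T2.2 = ((PySem.List.pyRange (b - 1) (d - 1)).map (fun i =>
      pvGet g (c - 1) (i + 1))).foldl min T1.2 := by
    rw [M2]; congr 1
    refine List.map_congr_left ?_
    intro i hi
    rw [PySem.List.mem_pyRange_one] at hi
    dsimp only
    rw [u1 _ _ (by omega) (by omega) (by omega)]
  have hq1 : T1.2 = ((PySem.List.pyRange (a - 1) (c - 1)).map (fun i =>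
      pvGet g (i + 1) (b - 1))).foldl min (pvGet g (a - 1) (b - 1)) := by
    rw [M1]
  have hLA : T4.2 = (((PySem.List.pyRange (a - 1) (c - 1)).map (fun i =>
        pvGet g (i + 1) (b - 1)) ++
      (PySem.List.pyRange (b - 1) (d - 1)).map (fun i => pvGet g (c - 1) (i + 1)) ++
      (PySem.List.pyRange (c - 1) (a - 1) (-1)).map (fun i => pvGet g (i - 1) (d - 1)) ++
      (PySem.List.pyRange (d - 1) (b - 1) (-1)).map (fun i =>
        if i = b - 1 + 1 then pvGet g (a - 1 + 1) (b - 1) else pvGet g (a - 1) (i - 1))).foldl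
        min (pvGet g (a - 1) (b - 1))) := by
    rw [hq4, hq3, hq2, hq1]
    simp [List.foldl_append]
  -- B's min over the gathered values
  have hcons : bCoords (a - 1) (b - 1) (c - 1) (d - 1)
      = (a - 1, b - 1) ::
        ((PySem.List.pyRange (b - 1 + 1) (d - 1)).map (fun j => (a - 1, j)) ++
         (PySem.List.pyRange (a - 1) (c - 1)).map (fun i => (i, d - 1)) ++
         (PySem.List.pyRange (d - 1) (b - 1) (-1)).map (fun j => (c - 1, j)) ++
         (PySem.List.pyRange (c - 1) (a - 1) (-1)).map (fun i => (i, b - 1))) := by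
    unfold bCoords
    rw [PySem.List.pyRange_one_cons (by omega : (b - 1 : Int) < d - 1)]
    simp only [List.map_cons, List.cons_append]
  have hIff : ∀ z : Int,
      z ∈ (pvGet g (a - 1) (b - 1)) ::
        (((PySem.List.pyRange (a - 1) (c - 1)).map (fun i => pvGet g (i + 1) (b - 1)) ++
          (PySem.List.pyRange (b - 1) (d - 1)).map (fun i => pvGet g (c - 1) (i + 1)) ++
          (PySem.List.pyRange (c - 1) (a - 1) (-1)).map (fun i => pvGet g (i - 1) (d - 1)) ++
          (PySem.List.pyRange (d - 1) (b - 1) (-1)).map (fun i =>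
            if i = b - 1 + 1 then pvGet g (a - 1 + 1) (b - 1) else pvGet g (a - 1) (i - 1))))
      ↔ z ∈ (bCoords (a - 1) (b - 1) (c - 1) (d - 1)).map (fun cc => pvGet g cc.1 cc.2) := by
    intro z
    simp only [List.mem_cons, List.mem_append, List.mem_map, PySem.List.mem_pyRange_one,
      PySem.List.mem_pyRange_neg_one, mem_bCoords]
    constructor
    · rintro (rfl | (((⟨i, hi, rfl⟩ | ⟨i, hi, rfl⟩) | ⟨i, hi, rfl⟩) | ⟨i, hi, rfl⟩))
      · exact ⟨(a - 1, b - 1), Or.inl ⟨rfl, by omega, by omega⟩, rfl⟩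
      · exact ⟨(i + 1, b - 1), Or.inr (Or.inr (Or.inr ⟨rfl, by omega, by omega⟩)), rfl⟩
      · exact ⟨(c - 1, i + 1), Or.inr (Or.inr (Or.inl ⟨rfl, by omega, by omega⟩)), rfl⟩
      · exact ⟨(i - 1, d - 1), Or.inr (Or.inl ⟨rfl, by omega, by omega⟩), rfl⟩
      · by_cases hib : i = b - 1 + 1
        · refine ⟨(a - 1 + 1, b - 1), Or.inr (Or.inr (Or.inr ⟨rfl, by omega, by omega⟩)), ?_⟩
          rw [if_pos hib]
        · refine ⟨(a - 1, i - 1), Or.inl ⟨rfl, by omega, by omega⟩, ?_⟩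
          rw [if_neg hib]
    · rintro ⟨⟨u, v⟩, hdisj, rfl⟩
      dsimp only at hdisj ⊢
      rcases hdisj with ⟨rfl, h1', h2'⟩ | ⟨rfl, h1', h2'⟩ | ⟨rfl, h1', h2'⟩ | ⟨rfl, h1', h2'⟩
      · by_cases hvb : v = b - 1
        · subst hvb; exact Or.inl rfl
        · refine Or.inr (Or.inr ⟨v + 1, ⟨by omega, by omega⟩, ?_⟩)
          rw [if_neg (by omega)]
          congr 1
          omega
      · refine Or.inr (Or.inl (Or.inr ⟨u + 1, ⟨by omega, by omega⟩, ?_⟩))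
        congr 1
        omega
      · refine Or.inr (Or.inl (Or.inl (Or.inr ⟨v - 1, ⟨by omega, by omega⟩, ?_⟩)))
        congr 1
        omega
      · refine Or.inr (Or.inl (Or.inl (Or.inl ⟨u - 1, ⟨by omega, by omega⟩, ?_⟩)))
        congr 2
        omega
  have hIff' := hIff
  rw [hcons, List.map_cons] at hIff'
  dsimp only at hIff'
  have hmin : T4.2 = (PySem.List.min?
      ((bCoords (a - 1) (b - 1) (c - 1) (d - 1)).map (fun cc => pvGet g cc.1 cc.2))
      (fun v => v)).getD 0 := by
    rw [hcons, List.map_cons]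
    dsimp only
    rw [PySem.List.min?_id_cons, Option.getD_some, hLA]
    exact foldl_min_set_eq hIff'
  -- assemble
  refine ⟨?_, hSA⟩
  refine Prod.ext hgrid ?_
  dsimp only
  rw [hmin]



theorem fold_eq (R C : Int) :
    ∀ (qs : List (Int × Int × Int × Int)) (g : List (List Int)) (ans : List Int),
    Shape g R C →
    (∀ q ∈ qs, 1 ≤ q.1 ∧ q.1 < q.2.2.1 ∧ q.2.2.1 ≤ R ∧
               1 ≤ q.2.1 ∧ q.2.1 < q.2.2.2 ∧ q.2.2.2 ≤ C) →
    List.foldl stepA (g, ans) qs = List.foldl stepB (g, ans) qs := by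
  intro qs
  induction qs with
  | nil => intros; rfl
  | cons q t ih =>
      intro g ans hS hq
      obtain ⟨a, b, c, d⟩ := q
      have hh := hq _ List.mem_cons_self
      obtain ⟨heq, hsh⟩ := step_eq R C g ans a b c d hS hh.1 hh.2.1 hh.2.2.1
        hh.2.2.2.1 hh.2.2.2.2.1 hh.2.2.2.2.2
      rw [List.foldl_cons, List.foldl_cons, ← heq]
      have hrec := ih (stepA (g, ans) (a, b, c, d)).1 (stepA (g, ans) (a, b, c, d)).2
        hsh (fun q' hq' => hq _ (List.mem_cons_of_mem _ hq'))
      rw [Prod.mk.eta] at hrec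
      exact hrec

-- ===== VERDICT (by name: the statement is the Claim_ definition above) =====
theorem solution_spec : Claim_equal_solution := by
  unfold Claim_equal_solution
  intro rows columns queries _ hpre
  unfold Spec_solution solution solution_alt
  cases queries with
  | nil => rfl
  | cons q t =>
      have hq := hpre q List.mem_cons_self
      have hR : 0 < rows := by omega
      have hC : 0 < columns := by omega
      obtain ⟨hAB, hshape⟩ := buildA_eq rows columns hR hC
      rw [hAB] at hshape ⊢
      rw [fold_eq rows columns (q :: t) (buildB rows columns) [] hshape hpre]
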